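-- pv_equiv track=rewrite | github.com/djemaouiahmed/Sudoku_Solver | sudokuTester.py | findCandidat
-- ===== SOURCE A (Python) =====
-- import copy
--
-- def findCandidat(Position: tuple[int, int], stat: list[list[int]]) -> list[int]:
--     board = copy.deepcopy(stat)  # Copy the board
--     candidat = [1, 2, 3, 4, 5, 6, 7, 8, 9]
--
--     # Remove candidates based on the row
--     for row in range(len(board)):
--         if board[row][Position[1]] in candidat:
--             candidat.remove(board[row][Position[1]])
--
--     # Remove candidates based on the column
--     for col in range(len(board[0])):
--         if board[Position[0]][col] in candidat:
--             candidat.remove(board[Position[0]][col])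
--
--     # Determine the top-left corner of the subgrid
--     start_row = (Position[0] // 3) * 3
--     start_col = (Position[1] // 3) * 3
--
--     # Remove candidates based on the subgrid
--     for row in range(start_row, start_row + 3):
--         for col in range(start_col, start_col + 3):
--             if board[row][col] in candidat:
--                 candidat.remove(board[row][col])
--
--     return candidat
-- ===== SOURCE B (Python) =====
-- def findCandidat(Position: tuple[int, int], stat: list[list[int]]) -> list[int]:
--     r, c = Position
--     sr = (r // 3) * 3
--     sc = (c // 3) * 3
--     seen = sorted([row[c] for row in stat] + stat[r] +
--                   [stat[i][j] for i in range(sr, sr + 3) for j in range(sc, sc + 3)])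
--     out = []
--     k = 0
--     for n in range(1, 10):
--         while k < len(seen) and seen[k] < n:
--             k += 1
--         if k == len(seen) or n < seen[k]:
--             out.append(n)
--     return out
-- ===== Notes on version B (the rewrite author's own statement) =====
-- stated objective: alternative
-- what changed: A deep-copies the board and repeatedly scans it, removing each hit from a mutable candidate list by membership test; B collects the row, column and subgrid values into one sorted list and computes the candidates by a single two-pointer merge (sorted set difference) against 1..9, with no copy and no candidate-list mutation.
import Mathlib
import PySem

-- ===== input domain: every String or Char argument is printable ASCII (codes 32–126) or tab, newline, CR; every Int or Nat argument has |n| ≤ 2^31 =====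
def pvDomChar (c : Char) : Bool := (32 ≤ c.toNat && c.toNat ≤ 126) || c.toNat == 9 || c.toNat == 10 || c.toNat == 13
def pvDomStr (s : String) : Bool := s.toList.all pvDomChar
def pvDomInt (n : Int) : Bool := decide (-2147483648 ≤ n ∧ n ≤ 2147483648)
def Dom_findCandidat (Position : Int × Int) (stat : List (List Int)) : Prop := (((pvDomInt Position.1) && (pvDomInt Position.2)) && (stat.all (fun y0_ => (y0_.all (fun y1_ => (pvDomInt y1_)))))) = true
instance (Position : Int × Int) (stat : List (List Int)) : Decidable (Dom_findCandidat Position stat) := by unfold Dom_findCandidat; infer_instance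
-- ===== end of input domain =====

-- B replaces A's repeated scan-and-remove-from-a-candidate-list with sorting the row/column/subgrid
-- values once and computing the candidates by a single two-pointer merge against 1..9 (objective:
-- alternative; A's deepcopy is dropped — A never mutates its argument).


-- ===== PORT A =====
-- board[i][j]; the defaults are never reached under Pre_ (all indices in Python's wrap range there)
def pvCell (stat : List (List Int)) (i j : Int) : Int :=
  PySem.List.pyGetD (PySem.List.pyGetD stat i []) j 0

-- 'if v in candidat: candidat.remove(v)'
def pvRemoveIfMem (cand : List Int) (v : Int) : List Int :=
  if v ∈ cand then (PySem.List.remove? cand v).getD cand else cand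

def findCandidat (Position : Int × Int) (stat : List (List Int)) : List Int :=
  let cand0 : List Int := [1, 2, 3, 4, 5, 6, 7, 8, 9]
  -- for row in range(len(board)): remove board[row][Position[1]]
  let cand1 := (PySem.List.pyRange 0 (stat.length : Int) 1).foldl
    (fun c row => pvRemoveIfMem c (pvCell stat row Position.2)) cand0
  -- for col in range(len(board[0])): remove board[Position[0]][col]
  let cand2 := (PySem.List.pyRange 0 ((stat.headD []).length : Int) 1).foldl
    (fun c col => pvRemoveIfMem c (pvCell stat Position.1 col)) cand1
  let startRow := PySem.Int.floordiv Position.1 3 * 3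
  let startCol := PySem.Int.floordiv Position.2 3 * 3
  -- for row in range(start_row, start_row+3): for col in range(start_col, start_col+3): remove board[row][col]
  (PySem.List.pyRange startRow (startRow + 3) 1).foldl
    (fun c row =>
      (PySem.List.pyRange startCol (startCol + 3) 1).foldl
        (fun c' col => pvRemoveIfMem c' (pvCell stat row col)) c) cand2

-- ===== PORT B =====
-- 'while k < len(seen) and seen[k] < n: k += 1'
def pvAdvance (seen : List Int) (n : Int) (k : Nat) : Nat :=
  if h : k < seen.length then
    if seen[k] < n then pvAdvance seen n (k + 1) else k
  else k
termination_by seen.length - k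

-- one iteration of B's 'for n in range(1, 10)' body, on state (out, k)
def pvStep (seen : List Int) (s : List Int × Nat) (n : Int) : List Int × Nat :=
  let k := pvAdvance seen n s.2
  if k = seen.length ∨ n < seen.getD k 0 then (s.1 ++ [n], k) else (s.1, k)

def findCandidat_alt (Position : Int × Int) (stat : List (List Int)) : List Int :=
  let r := Position.1
  let c := Position.2
  let sr := PySem.Int.floordiv r 3 * 3
  let sc := PySem.Int.floordiv c 3 * 3
  -- seen = sorted([row[c] for row in stat] + stat[r] + [stat[i][j] for i in …])
  let seen := PySem.List.sorted
    (stat.map (fun row => PySem.List.pyGetD row c 0) ++ PySem.List.pyGetD stat r [] ++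
      (PySem.List.pyRange sr (sr + 3) 1).flatMap
        (fun i => (PySem.List.pyRange sc (sc + 3) 1).map
          (fun j => PySem.List.pyGetD (PySem.List.pyGetD stat i []) j 0)))
    (fun x => x)
  -- two-pointer merge of [1..9] against the sorted seen values
  ((PySem.List.pyRange 1 10 1).foldl (pvStep seen) ([], 0)).1

-- ===== PRECONDITION & SPEC =====
-- Pre_ excludes every input where A raises IndexError (position, or the 3x3 subgrid window, outside
-- the wrap range of the board), and ragged (non-rectangular) boards — malformed input for a Sudoku
-- grid, where no column scan is specified: A reads the first row's width of row r, B reads all of row r.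
def Pre_findCandidat (Position : Int × Int) (stat : List (List Int)) : Prop :=
  (∀ row ∈ stat, row.length = (stat.headD []).length) ∧
  -(stat.length : Int) ≤ Position.1 ∧ Position.1 < (stat.length : Int) ∧
  -(((stat.headD []).length : Int)) ≤ Position.2 ∧ Position.2 < ((stat.headD []).length : Int) ∧
  -(stat.length : Int) ≤ PySem.Int.floordiv Position.1 3 * 3 ∧
  PySem.Int.floordiv Position.1 3 * 3 + 3 ≤ (stat.length : Int) ∧
  -(((stat.headD []).length : Int)) ≤ PySem.Int.floordiv Position.2 3 * 3 ∧
  PySem.Int.floordiv Position.2 3 * 3 + 3 ≤ ((stat.headD []).length : Int)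
instance (Position : Int × Int) (stat : List (List Int)) : Decidable (Pre_findCandidat Position stat) := by unfold Pre_findCandidat; infer_instance

def pvWitness_findCandidat : (Int × Int) × List (List Int) :=
  ((4, 7),
   [[5,3,0,0,7,0,0,0,0],[6,0,0,1,9,5,0,0,0],[0,9,8,0,0,0,0,6,0],
    [8,0,0,0,6,0,0,0,3],[4,0,0,8,0,3,0,0,1],[7,0,0,0,2,0,0,0,6],
    [0,6,0,0,0,0,2,8,0],[0,0,0,4,1,9,0,0,5],[0,0,0,0,8,0,0,7,9]])

def Spec_findCandidat (Position : Int × Int) (stat : List (List Int)) (out : List Int) : Prop := out = findCandidat_alt Position stat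
instance (Position : Int × Int) (stat : List (List Int)) (out : List Int) : Decidable (Spec_findCandidat Position stat out) := by unfold Spec_findCandidat; infer_instance

-- ===== CLAIM (what is proved, stated in full; the proofs are below) =====
def Claim_equal_findCandidat : Prop := ∀ (Position : Int × Int) (stat : List (List Int)), Dom_findCandidat Position stat → Pre_findCandidat Position stat → Spec_findCandidat Position stat (findCandidat Position stat)

-- ===== LEMMAS AND PROOFS =====

-- removing one element from a duplicate-free candidate list is filtering it out
lemma pvRemoveIfMem_eq_filter (cand : List Int) (v : Int) (h : cand.Nodup) :
    pvRemoveIfMem cand v = cand.filter (fun y => y != v) := by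
  unfold pvRemoveIfMem
  by_cases hv : v ∈ cand
  · rw [if_pos hv, PySem.List.remove?_eq_some_erase cand v hv, Option.getD_some,
      List.Nodup.erase_eq_filter h]
  · rw [if_neg hv, Eq.comm, List.filter_eq_self]
    intro a ha
    simp only [bne_iff_ne, ne_eq]
    exact fun he => hv (he ▸ ha)

-- A's remove loop over a value list xs, on a duplicate-free candidate list, is one filter
lemma foldl_pvRemoveIfMem (xs cand : List Int) (h : cand.Nodup) :
    xs.foldl pvRemoveIfMem cand = cand.filter (fun y => !(xs.contains y)) := by
  induction xs generalizing cand with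
  | nil => simp
  | cons x xs ih =>
    rw [List.foldl_cons, ih _ ((pvRemoveIfMem_eq_filter cand x h) ▸ h.filter _),
      pvRemoveIfMem_eq_filter cand x h, List.filter_filter]
    apply List.filter_congr
    intro a _
    simp only [List.contains_cons, Bool.not_or, Bool.and_comm, bne]

-- A's nested subgrid loop flattened to one remove loop over the 9 subgrid values
lemma foldl_nested (R C : List Int) (h : Int → Int → Int) (init : List Int) :
    R.foldl (fun cd i => C.foldl (fun cd' j => pvRemoveIfMem cd' (h i j)) cd) init
      = (R.flatMap (fun i => C.map (h i))).foldl pvRemoveIfMem init := by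
  rw [List.foldl_flatMap]
  simp only [List.foldl_map]

lemma pvAdvance_le_length (seen : List Int) (n : Int) (k : Nat) (hk : k ≤ seen.length) :
    pvAdvance seen n k ≤ seen.length := by
  induction k using pvAdvance.induct seen n with
  | case1 k h hlt ih => rw [pvAdvance.eq_def, dif_pos h, if_pos hlt]; exact ih h
  | case2 k h hlt => rw [pvAdvance.eq_def, dif_pos h, if_neg hlt]; exact hk
  | case3 k h => rw [pvAdvance.eq_def, dif_neg h]; exact hk

-- every element strictly before the stopped pointer is < n
lemma pvAdvance_inv (seen : List Int) (n : Int) (k : Nat)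
    (hk : ∀ i (hi : i < seen.length), i < k → seen[i] < n) :
    ∀ i (hi : i < seen.length), i < pvAdvance seen n k → seen[i] < n := by
  induction k using pvAdvance.induct seen n with
  | case1 k h hlt ih =>
    rw [pvAdvance.eq_def, dif_pos h, if_pos hlt]
    refine ih ?_
    intro i hi hik
    by_cases hik' : i < k
    · exact hk i hi hik'
    · have hieq : i = k := by omega
      subst hieq; exact hlt
  | case2 k h hlt => rw [pvAdvance.eq_def, dif_pos h, if_neg hlt]; exact hk
  | case3 k h => rw [pvAdvance.eq_def, dif_neg h]; exact hk

-- where the pointer stops, the value (if any) is ≥ n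
lemma pvAdvance_stop (seen : List Int) (n : Int) (k : Nat)
    (h : pvAdvance seen n k < seen.length) : n ≤ seen.getD (pvAdvance seen n k) 0 := by
  induction k using pvAdvance.induct seen n with
  | case1 k hk hlt ih => rw [pvAdvance.eq_def, dif_pos hk, if_pos hlt] at h ⊢; exact ih h
  | case2 k hk hlt =>
    rw [pvAdvance.eq_def, dif_pos hk, if_neg hlt] at h ⊢
    rw [List.getD_eq_getElem seen 0 hk]; omega
  | case3 k hk => rw [pvAdvance.eq_def, dif_neg hk] at h; omega

-- B's merge loop computes the sorted-set-difference: the digits not occurring in seen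
lemma merge_foldl (seen : List Int) (hs : seen.Pairwise (· ≤ ·)) :
    ∀ (digits : List Int), digits.Pairwise (· < ·) →
    ∀ (acc : List Int) (k : Nat), k ≤ seen.length →
    (∀ i (hi : i < seen.length), i < k → ∀ d ∈ digits, seen[i] < d) →
    (digits.foldl (pvStep seen) (acc, k)).1
      = acc ++ digits.filter (fun n => !(seen.contains n)) := by
  intro digits
  induction digits with
  | nil => intro _ acc k _ _; simp
  | cons d ds ih =>
    intro hd acc k hk hinv
    rw [List.foldl_cons]
    set k' := pvAdvance seen d k with hk'def
    have hk' : k' ≤ seen.length := pvAdvance_le_length seen d k hk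
    have hinv' : ∀ i (hi : i < seen.length), i < k' → seen[i] < d :=
      pvAdvance_inv seen d k (fun i hi hik => hinv i hi hik d (by simp))
    have hmem : d ∈ seen ↔ (k' < seen.length ∧ seen.getD k' 0 = d) := by
      constructor
      · intro hm
        obtain ⟨j, hj, hje⟩ := List.mem_iff_getElem.mp hm
        have hjk : k' ≤ j := by
          by_contra hc
          exact absurd hje (by have := hinv' j hj (by omega); omega)
        have hklt : k' < seen.length := by omega
        refine ⟨hklt, ?_⟩
        have h1 : seen[k'] ≤ seen[j] := by
          rcases Nat.lt_or_ge k' j with hlt | hge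
          · exact (List.pairwise_iff_getElem.mp hs) k' j hklt hj hlt
          · have : k' = j := by omega
            subst this; exact le_refl _
        have h2 : d ≤ seen[k'] := by
          have := pvAdvance_stop seen d k hklt
          rwa [List.getD_eq_getElem seen 0 hklt] at this
        rw [List.getD_eq_getElem seen 0 hklt]; omega
      · rintro ⟨hklt, he⟩
        rw [List.getD_eq_getElem seen 0 hklt] at he
        exact he ▸ List.getElem_mem hklt
    have hcond : (k' = seen.length ∨ d < seen.getD k' 0) ↔ ¬ (seen.contains d = true) := by
      rw [List.contains_eq_mem, decide_eq_true_iff, hmem]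
      constructor
      · rintro (h | h)
        · rintro ⟨hlt, _⟩; omega
        · rintro ⟨hlt, he⟩; omega
      · intro hnot
        by_cases hlen : k' = seen.length
        · exact Or.inl hlen
        · refine Or.inr ?_
          have hklt : k' < seen.length := by omega
          have h2 : d ≤ seen[k'] := by
            have := pvAdvance_stop seen d k hklt
            rwa [List.getD_eq_getElem seen 0 hklt] at this
          rw [List.getD_eq_getElem seen 0 hklt]
          rcases lt_or_eq_of_le h2 with h3 | h3
          · exact h3
          · exact absurd ⟨hklt, by rw [List.getD_eq_getElem seen 0 hklt]; omega⟩ hnot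
    have hinv2 : ∀ i (hi : i < seen.length), i < k' → ∀ d' ∈ ds, seen[i] < d' := by
      intro i hi hik d' hd'
      have h1 : seen[i] < d := hinv' i hi hik
      have h2 : d < d' := (List.pairwise_cons.mp hd).1 d' hd'
      omega
    have hstep : pvStep seen (acc, k) d
        = if k' = seen.length ∨ d < seen.getD k' 0 then (acc ++ [d], k') else (acc, k') := rfl
    rw [hstep]
    by_cases hc : k' = seen.length ∨ d < seen.getD k' 0
    · rw [if_pos hc, ih (List.pairwise_cons.mp hd).2 (acc ++ [d]) k' hk' hinv2,
        List.filter_cons, if_pos (by simpa using hcond.mp hc), List.append_assoc]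
      rfl
    · have hct : seen.contains d = true := by
        by_contra hct
        exact hc (hcond.mpr (by simpa using hct))
      rw [if_neg hc, ih (List.pairwise_cons.mp hd).2 acc k' hk' hinv2,
        List.filter_cons, if_neg (by simpa using hct)]

-- B's whole pipeline on an arbitrary value list: sort, then merge against [1..9]
lemma alt_filter (xs : List Int) :
    ((PySem.List.pyRange 1 10 1).foldl (pvStep (PySem.List.sorted xs (fun x => x))) ([], 0)).1
      = [1,2,3,4,5,6,7,8,9].filter (fun n => !(xs.contains n)) := by
  rw [merge_foldl _ (by simpa using PySem.List.sorted_pairwise xs (fun x => x))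
      (PySem.List.pyRange 1 10 1) (by decide) [] 0 (by omega) (fun i hi hik => by omega),
    show PySem.List.pyRange 1 10 1 = [1,2,3,4,5,6,7,8,9] by decide]
  simp only [List.nil_append]
  apply List.filter_congr
  intro y _
  simp [List.contains_eq_mem, PySem.List.mem_sorted]

-- ===== VERDICT (by name: the statement is the Claim_ definition above) =====
theorem findCandidat_spec : Claim_equal_findCandidat := by
  intro Position stat _ hpre
  obtain ⟨r, c⟩ := Position
  obtain ⟨hrect, hrlo, hrhi, hclo, hchi, hsr1, hsr2, hsc1, hsc2⟩ := hpre
  replace hrlo : -(stat.length : Int) ≤ r := hrlo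
  replace hrhi : r < (stat.length : Int) := hrhi
  show findCandidat (r, c) stat = findCandidat_alt (r, c) stat
  simp only [findCandidat, findCandidat_alt, pvCell]
  have hrowr_mem : PySem.List.pyGetD stat r [] ∈ stat :=
    PySem.List.pyGetD_mem stat [] ⟨hrlo, hrhi⟩
  have hrowr_len : (PySem.List.pyGetD stat r []).length = (stat.headD []).length :=
    hrect _ hrowr_mem
  -- A's row loop
  rw [PySem.List.foldl_pyRange_zero_pyGetD' stat []
    (fun cd row => pvRemoveIfMem cd (PySem.List.pyGetD row c 0)) [1,2,3,4,5,6,7,8,9]]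
  rw [← List.foldl_map (f := fun row => PySem.List.pyGetD row c 0) (g := pvRemoveIfMem)
    (l := stat) (init := [1,2,3,4,5,6,7,8,9])]
  rw [foldl_pvRemoveIfMem (stat.map (fun row => PySem.List.pyGetD row c 0))
    [1,2,3,4,5,6,7,8,9] (by decide)]
  -- A's column loop: its bound len(board[0]) is the length of row r (the board is rectangular)
  rw [← hrowr_len]
  rw [PySem.List.foldl_pyRange_zero_pyGetD' (PySem.List.pyGetD stat r []) 0 pvRemoveIfMem _]
  rw [foldl_pvRemoveIfMem (PySem.List.pyGetD stat r []) _ (List.Nodup.filter _ (by decide))]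
  -- A's subgrid loop
  rw [foldl_nested (PySem.List.pyRange (PySem.Int.floordiv r 3 * 3) (PySem.Int.floordiv r 3 * 3 + 3) 1)
    (PySem.List.pyRange (PySem.Int.floordiv c 3 * 3) (PySem.Int.floordiv c 3 * 3 + 3) 1)
    (fun i j => PySem.List.pyGetD (PySem.List.pyGetD stat i []) j 0) _]
  rw [foldl_pvRemoveIfMem _ _ (List.Nodup.filter _ (List.Nodup.filter _ (by decide)))]
  -- B's merge loop is a filter of [1..9] by non-membership in the sorted seen list
  rw [alt_filter]
  rw [List.filter_filter, List.filter_filter]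
  apply List.filter_congr
  intro y hy
  rw [Bool.eq_iff_iff]
  simp only [Bool.and_eq_true, Bool.not_eq_true', List.contains_eq_mem,
    decide_eq_false_iff_not, List.mem_append, List.mem_map, List.mem_flatMap]
  rw [not_or, not_or]
  constructor
  · rintro ⟨⟨h3, h2⟩, h1⟩; exact ⟨⟨h1, h2⟩, h3⟩
  · rintro ⟨⟨h1, h2⟩, h3⟩; exact ⟨⟨h3, h2⟩, h1⟩
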